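-- pv_equiv track=rewrite | github.com/Adeptus-Astartes/algorithms | codility/sum_of_nums_with_identical_border_digits.py | compute
-- ===== SOURCE A (Python) =====
-- def compute(data):
--
--     # using temp to filter uniq items and keep only duplicates
--     temp = {}
--     output = {}
--
--     for i in data:
--         nums = [int(str(i)[0]), int(str(i)[-1])]
--
--         # use first and last digit as Key
--         key = ''.join(map(str,nums))
--
--         if key in temp:
--             if key in output:
--                 output[key] = output[key] + i
--             else:
--                 output[key] = temp[key] + i
--         else:
--             temp[key] = i
--
--     if not output:
--         return -1
--
--     result = 0
--
--     # Find the item with the maximum value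
--     for i in output.values():
--         if i > result:
--             result = i
--     return result
-- ===== SOURCE B (Python) =====
-- def compute(data):
--     # Staged passes, no dict: precompute every key once, then for each key's
--     # first occurrence rescan the precomputed pairs to count and sum its group.
--     def key(n):
--         s = str(n)
--         return str(int(s[0])) + str(int(s[-1]))
--     keys = [key(i) for i in data]
--     best = -1
--     seen = []
--     for k in keys:
--         if k in seen:
--             continue
--         seen.append(k)
--         group = [x for x, kx in zip(data, keys) if kx == k]
--         if len(group) > 1:
--             s = sum(group)
--             if s > best:
--                 best = s
--     return best
-- ===== Notes on version B (the rewrite author's own statement) =====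
-- stated objective: alternative
-- what changed: A's incrementally maintained pair of dicts (temp holding the first number per key, output created and updated on repeats, then a max scan over output) is replaced by staged passes with no dict at all: precompute every element's key once, then for each key's first occurrence rescan the precomputed (element, key) pairs to collect, count and sum that group, folding the qualifying group sums into a running maximum.
import Mathlib
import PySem

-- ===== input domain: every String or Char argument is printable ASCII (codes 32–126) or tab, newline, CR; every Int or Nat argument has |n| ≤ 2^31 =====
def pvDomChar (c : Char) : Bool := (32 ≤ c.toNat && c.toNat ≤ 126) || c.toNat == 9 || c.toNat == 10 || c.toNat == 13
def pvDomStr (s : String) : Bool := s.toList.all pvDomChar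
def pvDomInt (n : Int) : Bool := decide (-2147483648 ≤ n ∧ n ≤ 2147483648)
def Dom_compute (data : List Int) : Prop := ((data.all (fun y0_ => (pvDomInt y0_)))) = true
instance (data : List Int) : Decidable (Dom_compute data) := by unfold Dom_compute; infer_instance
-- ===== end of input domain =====

-- B drops A's two incrementally maintained dicts: it precomputes each element's key once, then for
-- each key's FIRST occurrence rescans the precomputed pairs to count and sum that group (staged
-- passes with an explicit inner scan instead of dict bookkeeping); same result, alternative shape.

-- ===== PORT A =====
-- key = str(int(str(i)[0])) + str(int(str(i)[-1])) — the exact key expression of BOTH Python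
-- sources; none = the int() ValueError (e.g. the '-' first char of a negative), excluded by Pre_compute.
def keyOf (i : Int) : Option (List Char) :=
  let s := PySem.Int.toChars i
  match PySem.List.pyGet? s 0, PySem.List.pyGet? s (-1) with
  | some c0, some c1 =>
    match PySem.Int.ofChars? [c0], PySem.Int.ofChars? [c1] with
    | some d0, some d1 => some (PySem.Int.toChars d0 ++ PySem.Int.toChars d1)
    | _, _ => none
  | _, _ => none

def stepA (st : PySem.Dict (List Char) Int × PySem.Dict (List Char) Int) (i : Int) :
    PySem.Dict (List Char) Int × PySem.Dict (List Char) Int :=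
  match keyOf i with
  | none => st   -- Python raises ValueError here; such inputs are outside Pre_compute
  | some key =>
    if st.1.contains key then
      if st.2.contains key then (st.1, st.2.insert key (st.2.getD key 0 + i))
      else (st.1, st.2.insert key (st.1.getD key 0 + i))
    else (st.1.insert key i, st.2)

def computeLoopA (data : List Int) :
    PySem.Dict (List Char) Int × PySem.Dict (List Char) Int :=
  data.foldl stepA (PySem.Dict.empty, PySem.Dict.empty)

def compute (data : List Int) : Int :=
  let st := computeLoopA data
  if st.2.items.isEmpty then -1
  else st.2.values.foldl (fun result i => if i > result then i else result) 0

-- ===== PORT B =====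
-- Source B's main loop: `seen` is the list of keys already handled, `group` the inner rescan.
def bgo (pairs : List (Int × List Char)) (seen todo : List (List Char)) (best : Int) : Int :=
  match todo with
  | [] => best
  | k :: rest =>
    if seen.contains k then bgo pairs seen rest best
    else
      let group := (pairs.filter (fun p => p.2 == k)).map Prod.fst
      bgo pairs (seen ++ [k]) rest
        (if group.length > 1 then
           (if group.sum > best then group.sum else best)
         else best)

def compute_alt (data : List Int) : Int :=
  -- keys = [key(i) for i in data]; an element whose key() raises (outside Pre_compute) is skipped
  let pairs := data.filterMap (fun x => (keyOf x).map (fun k => (x, k)))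
  bgo pairs [] (pairs.map Prod.snd) (-1)

-- ===== PRECONDITION & SPEC =====
-- Pre_ excludes negative elements: on them str(i)[0] = '-' and int('-') raises ValueError in A (and in B).
def Pre_compute (data : List Int) : Prop := ∀ i ∈ data, 0 ≤ i
instance (data : List Int) : Decidable (Pre_compute data) := by unfold Pre_compute; infer_instance
def pvWitness_compute : List Int := [11, 101, 22]

def Spec_compute (data : List Int) (out : Int) : Prop := out = compute_alt data
instance (data : List Int) (out : Int) : Decidable (Spec_compute data out) := by unfold Spec_compute; infer_instance

-- ===== CLAIM (what is proved, stated in full; the proofs are below) =====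
def Claim_equal_compute : Prop := ∀ (data : List Int), Dom_compute data → Pre_compute data → Spec_compute data (compute data)

-- ===== LEMMAS AND PROOFS =====

-- the key-paired elements both ports work over, and the group of one key
def pairsOf (data : List Int) : List (Int × List Char) :=
  data.filterMap (fun x => (keyOf x).map (fun k => (x, k)))

def grp (P : List (Int × List Char)) (k : List Char) : List Int :=
  (P.filter (fun p => p.2 == k)).map Prod.fst

theorem grp_append_single (P : List (Int × List Char)) (i : Int) (k k' : List Char) :
    grp (P ++ [(i, k)]) k' = grp P k' ++ (if k = k' then [i] else []) := by
  unfold grp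
  rw [List.filter_append, List.map_append]
  by_cases h : k = k' <;> simp [h]

-- a key of an element is only formed for nonnegative elements (negatives hit int('-'))
theorem keyOf_nonneg (i : Int) (k : List Char) (h : keyOf i = some k) : 0 ≤ i := by
  by_contra hneg
  have hneg' : i < 0 := by omega
  have hs : PySem.Int.toChars i = '-' :: Nat.toDigits 10 i.natAbs := by
    simp [PySem.Int.toChars, hneg']
  have h0 : PySem.List.pyGet? ('-' :: Nat.toDigits 10 i.natAbs) 0 = some '-' := by
    simp [PySem.List.pyGet?, PySem.List.pyIdx?]
  simp only [keyOf, hs, h0] at h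
  cases h1 : PySem.List.pyGet? ('-' :: Nat.toDigits 10 i.natAbs) (-1) <;>
    simp [h1, show PySem.Int.ofChars? ['-'] = none from by decide] at h

-- every element of every group is nonnegative
theorem grp_nonneg (data : List Int) (k : List Char) :
    ∀ x ∈ grp (pairsOf data) k, 0 ≤ x := by
  intro x hx
  unfold grp at hx
  obtain ⟨p, hp, rfl⟩ := List.mem_map.mp hx
  have hp' := (List.mem_filter.mp hp).1
  unfold pairsOf at hp'
  obtain ⟨y, _, hy⟩ := List.mem_filterMap.mp hp'
  cases hk : keyOf y with
  | none => rw [hk] at hy; simp at hy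
  | some k' =>
    rw [hk] at hy
    simp only [Option.map_some, Option.some.injEq] at hy
    cases hy
    exact keyOf_nonneg y k' hk

-- invariant of A's loop over the processed pairs P
def InvA (P : List (Int × List Char))
    (temp output : PySem.Dict (List Char) Int) : Prop :=
  temp.keys.Nodup ∧ output.keys.Nodup ∧
  (∀ k, temp.contains k = true ↔ grp P k ≠ []) ∧
  (∀ k, (grp P k).length = 1 → temp.get? k = some (grp P k).sum) ∧
  (∀ k, output.get? k = if 2 ≤ (grp P k).length then some (grp P k).sum else none)

theorem invA_empty : InvA [] PySem.Dict.empty PySem.Dict.empty := by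
  refine ⟨?_, ?_, ?_, ?_, ?_⟩ <;>
    simp [grp, PySem.Dict.get?_empty, PySem.Dict.contains_empty, PySem.Dict.keys_empty]

theorem invA_step (P : List (Int × List Char))
    (temp output : PySem.Dict (List Char) Int) (i : Int) (key : List Char)
    (hInv : InvA P temp output) :
    InvA (P ++ [(i, key)])
      (if temp.contains key then temp else temp.insert key i)
      (if temp.contains key then
         (if output.contains key then output.insert key (output.getD key 0 + i)
          else output.insert key (temp.getD key 0 + i))
       else output) := by
  obtain ⟨hTN, hON, hTC, hT1, hO⟩ := hInv
  by_cases hc : temp.contains key = true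
  · have hne : grp P key ≠ [] := (hTC key).mp hc
    have hne0 : (grp P key).length ≠ 0 := fun h0 => hne (List.length_eq_zero_iff.mp h0)
    by_cases hoc : output.contains key = true
    · -- key already in output ⇒ its group already had ≥ 2 members
      have hlen : 2 ≤ (grp P key).length := by
        by_contra hlt
        have := hO key
        rw [if_neg hlt] at this
        rw [PySem.Dict.contains_eq_isSome_get?, this] at hoc
        exact Bool.noConfusion hoc
      have hget : output.get? key = some (grp P key).sum := by
        rw [hO key, if_pos hlen]
      have hgD : output.getD key 0 = (grp P key).sum :=
        PySem.Dict.getD_of_get?_eq_some output _ hget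
      simp only [hc, hoc, if_true, hgD]
      refine ⟨hTN, PySem.Dict.nodup_keys_insert _ _ _ hON, ?_, ?_, ?_⟩
      · intro k
        rw [grp_append_single, hTC]
        by_cases hk : key = k
        · subst hk; simp [hne]
        · simp [hk]
      · intro k hk
        rw [grp_append_single] at hk ⊢
        by_cases hkk : key = k
        · subst hkk
          exfalso
          rw [if_pos rfl, List.length_append] at hk
          simp at hk
          exact hne hk
        · simp only [if_neg hkk, List.append_nil] at hk ⊢
          exact hT1 k hk
      · intro k
        by_cases hkk : k = key
        · subst hkk
          rw [grp_append_single, if_pos rfl, PySem.Dict.get?_insert, if_pos rfl,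
              if_pos (by rw [List.length_append]; simp; omega)]
          simp
        · have hg : grp (P ++ [(i, key)]) k = grp P k := by
            rw [grp_append_single, if_neg (Ne.symm hkk), List.append_nil]
          rw [hg, PySem.Dict.get?_insert, if_neg hkk, hO k]
    · -- key in temp only ⇒ its group had exactly 1 member
      have hnot2 : ¬ 2 ≤ (grp P key).length := by
        intro h2
        have := hO key
        rw [if_pos h2] at this
        rw [PySem.Dict.contains_eq_isSome_get?, this] at hoc
        exact hoc rfl
      have hlen1 : (grp P key).length = 1 := by omega
      have htget : temp.get? key = some (grp P key).sum := hT1 key hlen1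
      have htD : temp.getD key 0 = (grp P key).sum :=
        PySem.Dict.getD_of_get?_eq_some temp _ htget
      have hocF : output.contains key = false := by simpa using hoc
      simp only [hc, hocF, if_true, Bool.false_eq_true, if_false, htD]
      refine ⟨hTN, PySem.Dict.nodup_keys_insert _ _ _ hON, ?_, ?_, ?_⟩
      · intro k
        rw [grp_append_single, hTC]
        by_cases hk : key = k
        · subst hk; simp [hne]
        · simp [hk]
      · intro k hk
        rw [grp_append_single] at hk ⊢
        by_cases hkk : key = k
        · subst hkk
          exfalso
          rw [if_pos rfl, List.length_append] at hk
          simp at hk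
          exact hne hk
        · simp only [if_neg hkk, List.append_nil] at hk ⊢
          exact hT1 k hk
      · intro k
        by_cases hkk : k = key
        · subst hkk
          rw [grp_append_single, if_pos rfl, PySem.Dict.get?_insert, if_pos rfl,
              if_pos (by rw [List.length_append]; simp; omega)]
          simp
        · have hg : grp (P ++ [(i, key)]) k = grp P k := by
            rw [grp_append_single, if_neg (Ne.symm hkk), List.append_nil]
          rw [hg, PySem.Dict.get?_insert, if_neg hkk, hO k]
  · -- fresh key ⇒ empty group so far
    have hcF : temp.contains key = false := by simpa using hc
    have hempty : grp P key = [] := by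
      by_contra hne
      exact hc ((hTC key).mpr hne)
    simp only [hcF, Bool.false_eq_true, if_false]
    refine ⟨PySem.Dict.nodup_keys_insert _ _ _ hTN, hON, ?_, ?_, ?_⟩
    · intro k
      rw [PySem.Dict.contains_insert, grp_append_single]
      by_cases hk : key = k
      · subst hk; simp [hempty]
      · have hb : (k == key) = false := by simp [Ne.symm hk]
        simp [hb, hTC k, hk]
    · intro k hk
      rw [grp_append_single] at hk
      rw [PySem.Dict.get?_insert, grp_append_single]
      by_cases hkk : k = key
      · subst hkk
        rw [if_pos rfl, hempty]
        simp
      · rw [if_neg hkk]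
        simp only [if_neg (Ne.symm hkk), List.append_nil] at hk ⊢
        exact hT1 k hk
    · intro k
      rw [hO k, grp_append_single]
      by_cases hkk : key = k
      · subst hkk
        rw [hempty]
        simp
      · simp [hkk]

theorem invA_loop (l : List Int) (P : List (Int × List Char))
    (temp output : PySem.Dict (List Char) Int) (hInv : InvA P temp output) :
    InvA (P ++ pairsOf l)
      (l.foldl stepA (temp, output)).1 (l.foldl stepA (temp, output)).2 := by
  induction l generalizing P temp output with
  | nil => simpa [pairsOf] using hInv
  | cons x l ih =>
    simp only [List.foldl_cons]
    cases hk : keyOf x with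
    | none =>
      have hskip : stepA (temp, output) x = (temp, output) := by simp [stepA, hk]
      have hpair : pairsOf (x :: l) = pairsOf l := by simp [pairsOf, hk]
      rw [hskip, hpair]
      exact ih P temp output hInv
    | some key =>
      have hpair : pairsOf (x :: l) = (x, key) :: pairsOf l := by simp [pairsOf, hk]
      rw [hpair, show P ++ (x, key) :: pairsOf l = (P ++ [(x, key)]) ++ pairsOf l by simp]
      have hred : stepA (temp, output) x =
          ((if temp.contains key then temp else temp.insert key x),
           (if temp.contains key then
              (if output.contains key then output.insert key (output.getD key 0 + x)
               else output.insert key (temp.getD key 0 + x))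
            else output)) := by
        by_cases h1 : temp.contains key = true
        · by_cases h2 : output.contains key = true <;> simp [stepA, hk, h1, h2]
        · simp [stepA, hk, h1]
      rw [hred]
      exact ih _ _ _ (invA_step P temp output x key ⟨hInv.1, hInv.2.1, hInv.2.2.1, hInv.2.2.2.1, hInv.2.2.2.2⟩)

-- the keys B's loop actually processes: first occurrences not already seen
def fns (seen todo : List (List Char)) : List (List Char) :=
  match todo with
  | [] => []
  | k :: rest => if seen.contains k then fns seen rest else k :: fns (seen ++ [k]) rest

theorem mem_fns (todo : List (List Char)) :
    ∀ seen k, k ∈ fns seen todo ↔ k ∈ todo ∧ k ∉ seen := by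
  induction todo with
  | nil => simp [fns]
  | cons a rest ih =>
    intro seen k
    unfold fns
    by_cases ha : seen.contains a = true
    · have haM : a ∈ seen := by simpa using ha
      rw [if_pos ha, ih]
      constructor
      · rintro ⟨h1, h2⟩
        exact ⟨List.mem_cons_of_mem _ h1, h2⟩
      · rintro ⟨h1, h2⟩
        rcases List.mem_cons.mp h1 with rfl | h1
        · exact absurd haM h2
        · exact ⟨h1, h2⟩
    · have haM : a ∉ seen := by simpa using ha
      rw [if_neg ha]
      simp only [List.mem_cons, ih]
      constructor
      · rintro (rfl | ⟨h1, h2⟩)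
        · exact ⟨Or.inl rfl, haM⟩
        · simp at h2
          exact ⟨Or.inr h1, h2.1⟩
      · rintro ⟨rfl | h1, h2⟩
        · exact Or.inl rfl
        · by_cases hk : k = a
          · exact Or.inl hk
          · exact Or.inr ⟨h1, by simp [h2, hk]⟩

theorem nodup_fns (todo : List (List Char)) : ∀ seen, (fns seen todo).Nodup := by
  induction todo with
  | nil => intro seen; simp [fns]
  | cons a rest ih =>
    intro seen
    unfold fns
    by_cases ha : seen.contains a = true
    · rw [if_pos ha]; exact ih seen
    · rw [if_neg ha]
      refine List.nodup_cons.mpr ⟨?_, ih _⟩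
      intro hmem
      have := (mem_fns rest (seen ++ [a]) a).mp hmem
      simp at this

-- B's loop = a max-fold over the qualifying group sums of the first-occurrence keys
theorem bgo_eq (pairs : List (Int × List Char)) (todo : List (List Char)) :
    ∀ seen best, bgo pairs seen todo best =
      ((fns seen todo).filterMap (fun k =>
        if 1 < (grp pairs k).length then some (grp pairs k).sum else none)).foldl max best := by
  induction todo with
  | nil => intro seen best; rfl
  | cons a rest ih =>
    intro seen best
    unfold bgo fns
    by_cases ha : seen.contains a = true
    · rw [if_pos ha, if_pos ha, ih]
    · rw [if_neg ha, if_neg ha]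
      show bgo pairs (seen ++ [a]) rest _ = _
      rw [ih]
      have hgrp : (List.map Prod.fst (List.filter (fun p => p.2 == a) pairs)) = grp pairs a := rfl
      by_cases hl : 1 < (grp pairs a).length
      · simp only [hgrp, List.filterMap_cons, if_pos hl, List.foldl_cons]
        congr 1
        rw [max_def]
        split_ifs <;> omega
      · simp only [hgrp, List.filterMap_cons, if_neg hl]

-- filterMap with an if-guard = map over filter
theorem filterMap_if_eq_map_filter (l : List (List Char)) (p : List Char → Prop)
    [DecidablePred p] (f : List Char → Int) :
    l.filterMap (fun k => if p k then some (f k) else none)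
      = (l.filter (fun k => decide (p k))).map f := by
  induction l with
  | nil => rfl
  | cons a l ih =>
    by_cases h : p a <;> simp [h, ih]

theorem maxfold_eq (l : List Int) (a : Int) :
    l.foldl (fun b t => if t > b then t else b) a = l.foldl max a := by
  have h : (fun (b t : Int) => if t > b then t else b) = max := by
    funext b t; simp [max_def]; split_ifs <;> omega
  rw [h]

-- final assembly: A's scan over output.values = B's bgo result
theorem final_eq (data : List Int)
    (temp output : PySem.Dict (List Char) Int)
    (hInv : InvA (pairsOf data) temp output) :
    (if output.items.isEmpty then (-1 : Int)
     else output.values.foldl (fun result i => if i > result then i else result) 0)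
      = bgo (pairsOf data) [] ((pairsOf data).map Prod.snd) (-1) := by
  obtain ⟨hTN, hON, hTC, hT1, hO⟩ := hInv
  set P := pairsOf data with hP
  set keys := P.map Prod.snd with hkeys
  -- output.keys ↔ keys with group length ≥ 2
  have hmemO : ∀ k, k ∈ output.keys ↔ k ∈ keys ∧ 1 < (grp P k).length := by
    intro k
    rw [← PySem.Dict.contains_iff_mem_keys, PySem.Dict.contains_eq_isSome_get?, hO k]
    constructor
    · intro h
      by_cases h2 : 2 ≤ (grp P k).length
      · refine ⟨?_, by omega⟩
        have hne : P.filter (fun p => p.2 == k) ≠ [] := by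
          intro h0
          have hz : (grp P k).length = 0 := by unfold grp; rw [h0]; rfl
          omega
        obtain ⟨q, hq⟩ := List.exists_mem_of_ne_nil _ hne
        have hq1 := (List.mem_filter.mp hq).1
        have hq2 : q.2 = k := by simpa using (List.mem_filter.mp hq).2
        rw [hkeys]
        exact List.mem_map.mpr ⟨q, hq1, hq2⟩
      · rw [if_neg h2] at h
        simp at h
    · rintro ⟨-, h2⟩
      rw [if_pos (by omega)]
      rfl
  have hpermK : output.keys.Perm
      ((fns [] keys).filter (fun k => decide (1 < (grp P k).length))) := by
    refine (List.perm_ext_iff_of_nodup hON ((nodup_fns keys []).filter _)).mpr ?_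
    intro k
    rw [hmemO k, List.mem_filter, mem_fns]
    simp
  have hvals : output.values = output.keys.map (fun k => (grp P k).sum) := by
    rw [PySem.Dict.values_eq_map_keys output hON 0]
    refine List.map_congr_left (fun k hk => ?_)
    have h2 := (hmemO k).mp hk
    exact PySem.Dict.getD_of_get?_eq_some output _ (by rw [hO k, if_pos (by omega)])
  rw [bgo_eq, filterMap_if_eq_map_filter (fns [] keys) (fun k => 1 < (grp P k).length) (fun k => (grp P k).sum)]
  have hpermV : output.values.Perm
      (((fns [] keys).filter (fun k => decide (1 < (grp P k).length))).map
        (fun k => (grp P k).sum)) := by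
    rw [hvals]; exact hpermK.map _
  letI : RightCommutative (max : Int → Int → Int) :=
    ⟨fun b x y => by rw [max_assoc, max_comm x y, ← max_assoc]⟩
  by_cases hemp : output.items.isEmpty = true
  · have hkeys0 : output.keys = [] := by
      simp only [PySem.Dict.keys]
      rw [List.isEmpty_iff.mp hemp]
      rfl
    have : ((fns [] keys).filter (fun k => decide (1 < (grp P k).length))) = [] :=
      (hkeys0 ▸ hpermK).symm.eq_nil
    rw [if_pos hemp, this]
    rfl
  · rw [if_neg hemp, maxfold_eq, ← hpermV.foldl_eq]
    have hkne : output.keys ≠ [] := by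
      intro h
      refine hemp (List.isEmpty_iff.mpr ?_)
      have := congrArg List.length h
      simp only [PySem.Dict.keys, List.length_map] at this
      exact List.length_eq_zero_iff.mp (by simpa using this)
    rw [hvals]
    cases hk : output.keys with
    | nil => exact absurd hk hkne
    | cons x l =>
      have hx0 : 0 ≤ (grp P x).sum := by
        refine List.sum_nonneg (fun a ha => ?_)
        exact grp_nonneg data x a ha
      simp only [List.map_cons, List.foldl_cons]
      rw [max_eq_right (by omega : (0:Int) ≤ _), max_eq_right (by omega : (-1:Int) ≤ _)]

-- ===== VERDICT (by name: the statement is the Claim_ definition above) =====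
theorem compute_spec : Claim_equal_compute := by
  intro data _ _
  unfold Spec_compute compute compute_alt computeLoopA
  exact final_eq data _ _ (by simpa using invA_loop data [] PySem.Dict.empty PySem.Dict.empty invA_empty)
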